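-- pv_equiv track=rewrite | github.com/xl666/recursosEstructuras24 | parcial1/estudiantes/Turan/codigos hechos en clase/4.semana/tarea/intersección listas.2rafa.py | RegresarInterseccion
-- ===== SOURCE A (Python) =====
-- def RegresarInterseccion(lista1, lista2):
--
--     interseccion = set()
--
--
--     for item in lista1:
--         for item2 in lista2:
--             if item2 - 1 < item <= item2:
--                 interseccion.add(item)
--
--
--     interseccion = sorted(list(interseccion))
--
--     return interseccion
-- ===== SOURCE B (Python) =====
-- def RegresarInterseccion(lista1, lista2):
--     # For integers, item2 - 1 < item <= item2 is exactly item == item2,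
--     # so this is plain set intersection, sorted.
--     return sorted(set(lista1) & set(lista2))
-- ===== Notes on version B (the rewrite author's own statement) =====
-- stated objective: faster
-- what changed: The nested scan tests item2-1 < item <= item2, which over integers is just item == item2; B replaces the O(n*m) double loop by hash-set intersection of the two lists followed by a sort.
import Mathlib
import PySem

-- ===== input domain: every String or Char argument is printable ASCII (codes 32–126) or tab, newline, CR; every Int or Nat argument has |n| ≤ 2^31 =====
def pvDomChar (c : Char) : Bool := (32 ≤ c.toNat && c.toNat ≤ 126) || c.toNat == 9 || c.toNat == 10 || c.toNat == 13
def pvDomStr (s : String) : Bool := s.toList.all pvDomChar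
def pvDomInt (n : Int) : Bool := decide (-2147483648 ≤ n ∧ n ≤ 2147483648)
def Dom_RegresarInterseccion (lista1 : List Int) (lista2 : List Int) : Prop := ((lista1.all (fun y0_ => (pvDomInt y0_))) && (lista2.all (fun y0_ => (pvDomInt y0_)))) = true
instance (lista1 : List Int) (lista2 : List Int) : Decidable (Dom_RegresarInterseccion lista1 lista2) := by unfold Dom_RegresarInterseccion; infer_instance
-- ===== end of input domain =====

-- ===== PORT A =====
-- B changes: the integer test item2-1 < item <= item2 is item == item2, so B is
-- hash-set intersection + sort instead of A's nested O(n*m) scan (measured faster).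
def RegresarInterseccion (lista1 : List Int) (lista2 : List Int) : List Int :=
  let interseccion : PySem.Set Int :=
    lista1.foldl (fun acc item =>
      lista2.foldl (fun acc2 item2 =>
        if item2 - 1 < item ∧ item ≤ item2 then PySem.Set.add acc2 item else acc2) acc)
      PySem.Set.empty
  PySem.List.sorted interseccion (fun x => x) false

-- ===== PORT B =====
def RegresarInterseccion_alt (lista1 : List Int) (lista2 : List Int) : List Int :=
  PySem.List.sorted
    (PySem.Set.inter (PySem.Set.ofList lista1) (PySem.Set.ofList lista2))
    (fun x => x) false

-- ===== PRECONDITION & SPEC =====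
def Spec_RegresarInterseccion (lista1 : List Int) (lista2 : List Int) (out : List Int) : Prop := out = RegresarInterseccion_alt lista1 lista2
instance (lista1 : List Int) (lista2 : List Int) (out : List Int) : Decidable (Spec_RegresarInterseccion lista1 lista2 out) := by unfold Spec_RegresarInterseccion; infer_instance

-- ===== CLAIM (what is proved, stated in full; the proofs are below) =====
def Claim_equal_RegresarInterseccion : Prop := ∀ (lista1 : List Int) (lista2 : List Int), Dom_RegresarInterseccion lista1 lista2 → Spec_RegresarInterseccion lista1 lista2 (RegresarInterseccion lista1 lista2)

-- ===== LEMMAS AND PROOFS =====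

-- A's inner loop over lista2 adds item exactly when item ∈ lista2 (integer squeeze).
theorem inner_loop_eq (item : Int) (l2 : List Int) (acc : PySem.Set Int) :
    l2.foldl (fun acc2 item2 =>
        if item2 - 1 < item ∧ item ≤ item2 then PySem.Set.add acc2 item else acc2) acc
      = if item ∈ l2 then PySem.Set.add acc item else acc := by
  induction l2 generalizing acc with
  | nil => simp
  | cons x xs ih =>
    simp only [List.foldl_cons, List.mem_cons]
    by_cases hx : item = x
    · subst hx
      have hc : item - 1 < item ∧ item ≤ item := by omega
      rw [if_pos hc, ih]
      have hmem : item ∈ PySem.Set.add acc item := (PySem.Set.mem_add acc item item).mpr (Or.inr rfl)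
      rw [PySem.Set.add_of_mem hmem]
      simp
    · have hc : ¬ (x - 1 < item ∧ item ≤ x) := by omega
      rw [if_neg hc, ih]
      simp [hx]

theorem mem_outer_loop (l1 l2 : List Int) (acc : PySem.Set Int) (y : Int) :
    (y ∈ l1.foldl (fun acc item => if item ∈ l2 then PySem.Set.add acc item else acc) acc)
      ↔ y ∈ acc ∨ (y ∈ l1 ∧ y ∈ l2) := by
  induction l1 generalizing acc with
  | nil => simp
  | cons x xs ih =>
    simp only [List.foldl_cons, ih, List.mem_cons]
    by_cases hx : x ∈ l2
    · simp only [if_pos hx, PySem.Set.mem_add]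
      constructor
      · rintro ((h | rfl) | h)
        · exact Or.inl h
        · exact Or.inr ⟨Or.inl rfl, hx⟩
        · exact Or.inr ⟨Or.inr h.1, h.2⟩
      · rintro (h | ⟨(rfl | h), h2⟩)
        · exact Or.inl (Or.inl h)
        · exact Or.inl (Or.inr rfl)
        · exact Or.inr ⟨h, h2⟩
    · simp only [if_neg hx]
      constructor
      · rintro (h | h)
        · exact Or.inl h
        · exact Or.inr ⟨Or.inr h.1, h.2⟩
      · rintro (h | ⟨(rfl | h), h2⟩)
        · exact Or.inl h
        · exact absurd h2 hx
        · exact Or.inr ⟨h, h2⟩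

theorem nodup_outer_loop (l1 l2 : List Int) (acc : PySem.Set Int) (h : acc.Nodup) :
    (l1.foldl (fun acc item => if item ∈ l2 then PySem.Set.add acc item else acc) acc).Nodup := by
  induction l1 generalizing acc with
  | nil => simpa
  | cons x xs ih =>
    simp only [List.foldl_cons]
    split
    · exact ih _ (PySem.Set.nodup_add _ _ h)
    · exact ih _ h

-- ===== VERDICT (by name: the statement is the Claim_ definition above) =====
theorem RegresarInterseccion_spec : Claim_equal_RegresarInterseccion := by
  intro l1 l2 _
  unfold Spec_RegresarInterseccion RegresarInterseccion RegresarInterseccion_alt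
  have hA : (fun acc item =>
      l2.foldl (fun acc2 item2 =>
        if item2 - 1 < item ∧ item ≤ item2 then PySem.Set.add acc2 item else acc2) acc)
    = fun acc item => if item ∈ l2 then PySem.Set.add acc item else acc := by
    funext acc item; exact inner_loop_eq item l2 acc
  simp only [hA]
  apply (PySem.List.sorted_id_eq_sorted_id_iff_perm _ _).mpr
  apply (List.perm_ext_iff_of_nodup _ _).mpr
  · intro a
    rw [mem_outer_loop, PySem.Set.mem_inter]
    simp only [PySem.Set.mem_ofList]
    simp [PySem.Set.empty]
  · exact nodup_outer_loop _ _ _ (by simp [PySem.Set.empty])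
  · exact PySem.Set.nodup_inter _ _ (PySem.Set.nodup_ofList _)
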